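-- pv_equiv track=rewrite | github.com/TaylorBDean/CUGAr-SALES | scripts/verify_guardrails.py | _extract_vnext_entries
-- ===== SOURCE A (Python) =====
-- def _extract_vnext_entries(changelog: str) -> list[str]:
--     lines = changelog.splitlines()
--     entries: list[str] = []
--     in_vnext = False
--     for line in lines:
--         if line.startswith("## "):
--             if in_vnext and not line.lower().startswith("## vnext"):
--                 break
--             if line.lower().startswith("## vnext"):
--                 in_vnext = True
--                 continue
--         if in_vnext:
--             entries.append(line.strip())
--     return [line for line in entries if line]
-- ===== SOURCE B (Python) =====
-- def _extract_vnext_entries(changelog: str) -> list[str]: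
--     lines = changelog.splitlines()
--     n = len(lines)
--     # index of the first vnext header (n if none)
--     i = 0
--     while i < n and not lines[i].lower().startswith("## vnext"):
--         i += 1
--     # end of the contiguous vnext run: first non-vnext "## " header after it
--     j = i
--     while j < n and not (lines[j].startswith("## ") and not lines[j].lower().startswith("## vnext")):
--         j += 1
--     body = lines[i:j]
--     return [s for s in (l.strip() for l in body if not l.lower().startswith("## vnext")) if s]
-- ===== Notes on version B (the rewrite author's own statement) =====
-- stated objective: alternative
-- what changed: Replaces A's single stateful loop with break/continue flags by two index scans (find the first vnext header, then the end of its contiguous run), a slice of that region, and one filtering comprehension.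
import Mathlib
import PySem

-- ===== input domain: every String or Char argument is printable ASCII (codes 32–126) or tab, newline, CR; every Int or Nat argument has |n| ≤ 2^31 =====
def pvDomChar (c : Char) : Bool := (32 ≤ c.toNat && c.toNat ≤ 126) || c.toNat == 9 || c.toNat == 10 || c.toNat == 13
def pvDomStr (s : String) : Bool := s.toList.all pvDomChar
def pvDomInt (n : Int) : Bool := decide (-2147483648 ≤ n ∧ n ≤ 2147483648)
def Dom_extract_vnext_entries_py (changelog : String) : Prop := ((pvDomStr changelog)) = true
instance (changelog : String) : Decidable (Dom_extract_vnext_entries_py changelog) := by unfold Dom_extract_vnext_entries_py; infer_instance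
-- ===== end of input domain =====

-- B replaces A's stateful break/continue loop by two index scans (start of the first
-- vnext run, its end) plus a slice and one comprehension; objective: alternative decomposition.

-- shared one-line predicates (both Pythons test these same expressions inline)
def pvIsV (l : String) : Bool := PySem.Str.startswith (PySem.Str.lower l) "## vnext"
def pvIsH (l : String) : Bool := PySem.Str.startswith l "## "

-- ===== PORT A =====
def pvALoop : List String → List String → Bool → List String
  | [], entries, _ => entries
  | line :: rest, entries, in_vnext =>
    if pvIsH line then
      if in_vnext && !pvIsV line then entries            -- break
      else if pvIsV line then pvALoop rest entries true  -- continue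
      else if in_vnext then pvALoop rest (entries ++ [PySem.Str.strip line]) in_vnext
      else pvALoop rest entries in_vnext
    else if in_vnext then pvALoop rest (entries ++ [PySem.Str.strip line]) in_vnext
    else pvALoop rest entries in_vnext

def extract_vnext_entries_py (changelog : String) : List String :=
  (pvALoop (PySem.Str.splitlines changelog) [] false).filter (fun l => !(l == ""))

-- ===== PORT B =====
-- the two `while` index scans of Source B
def pvFindFrom (p : String → Bool) (lines : List String) (i : Nat) : Nat :=
  if h : i < lines.length then
    if p lines[i] then i else pvFindFrom p lines (i + 1)
  else i
termination_by lines.length - i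

def extract_vnext_entries_py_alt (changelog : String) : List String :=
  let lines := PySem.Str.splitlines changelog
  let i := pvFindFrom pvIsV lines 0
  let j := pvFindFrom (fun l => pvIsH l && !pvIsV l) lines i
  let body := PySem.List.slice lines (some (i : Int)) (some (j : Int))
  ((body.filter (fun l => !pvIsV l)).map PySem.Str.strip).filter (fun s => !(s == ""))

-- ===== PRECONDITION & SPEC =====
def Spec_extract_vnext_entries_py (changelog : String) (out : List String) : Prop := out = extract_vnext_entries_py_alt changelog
instance (changelog : String) (out : List String) : Decidable (Spec_extract_vnext_entries_py changelog out) := by unfold Spec_extract_vnext_entries_py; infer_instance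

-- ===== CLAIM (what is proved, stated in full; the proofs are below) =====
def Claim_equal_extract_vnext_entries_py : Prop := ∀ (changelog : String), Dom_extract_vnext_entries_py changelog → Spec_extract_vnext_entries_py changelog (extract_vnext_entries_py changelog)

-- ===== LEMMAS AND PROOFS =====

-- the common normal form both ports reduce to, applied to the suffix starting at
-- the first vnext header
def pvCollect (lines : List String) : List String :=
  ((lines.takeWhile (fun l => !(pvIsH l && !pvIsV l))).filter (fun l => !pvIsV l)).map PySem.Str.strip

lemma pvToNat_ofNat (m : Nat) (hv : m.isValidChar) : (Char.ofNat m).toNat = m := by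
  unfold Char.ofNat
  simp [hv, Char.ofNatAux, Char.toNat]

lemma pvLowerChar_low {c d : Char} (hd : d.toNat < 97) (h : PySem.Chars.lowerChar c = d) :
    c = d := by
  unfold PySem.Chars.lowerChar PySem.Chars.isupper at h
  split at h
  · rename_i hu
    rw [Bool.and_eq_true, decide_eq_true_eq, decide_eq_true_eq] at hu
    exfalso
    have h1 : 65 ≤ c.toNat := hu.1
    have h2 : c.toNat ≤ 90 := hu.2
    have hv : (c.toNat + 32).isValidChar := Or.inl (by omega)
    have hx : (Char.ofNat (c.toNat + 32)).toNat = c.toNat + 32 := pvToNat_ofNat _ hv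
    have h3 : c.toNat + 32 = d.toNat := by rw [← hx, h]
    omega
  · exact h

-- a line whose lowercase starts with "## vnext" starts with "## "
lemma isV_isH {l : String} (h : pvIsV l = true) : pvIsH l = true := by
  unfold pvIsV at h
  unfold pvIsH
  rw [PySem.Str.startswith_eq, PySem.Chars.startswith_iff] at h ⊢
  rw [PySem.Str.toList_lower] at h
  obtain ⟨t, ht⟩ := h
  unfold PySem.Chars.lower at ht
  have hlit : "## vnext".toList = ['#', '#', ' ', 'v', 'n', 'e', 'x', 't'] := rfl
  rw [hlit] at ht
  match hl : l.toList with
  | [] => rw [hl] at ht; simp at ht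
  | [a] => rw [hl] at ht; simp at ht
  | [a, b] => rw [hl] at ht; simp at ht
  | a :: b :: c :: rest =>
    rw [hl] at ht
    simp only [List.map_cons, List.cons_append, List.cons.injEq] at ht
    obtain ⟨ha, hb, hc, -⟩ := ht
    refine ⟨rest, ?_⟩
    rw [pvLowerChar_low (by decide) ha.symm, pvLowerChar_low (by decide) hb.symm,
      pvLowerChar_low (by decide) hc.symm]
    rfl

lemma pvALoop_true (lines : List String) (e : List String) :
    pvALoop lines e true = e ++ pvCollect lines := by
  induction lines generalizing e with
  | nil => simp [pvALoop, pvCollect]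
  | cons l r ih =>
    by_cases hH : pvIsH l = true
    · by_cases hV : pvIsV l = true
      · simp [pvALoop, hH, hV, pvCollect, ih]
      · simp [pvALoop, hH, hV, pvCollect]
    · have hV : pvIsV l = false := by
        by_contra hc
        exact hH (isV_isH (by simpa using hc))
      simp [pvALoop, hH, hV, pvCollect, ih]

lemma pvALoop_false (lines : List String) (e : List String) :
    pvALoop lines e false = e ++ pvCollect (lines.dropWhile (fun l => !pvIsV l)) := by
  induction lines generalizing e with
  | nil => simp [pvALoop, pvCollect]
  | cons l r ih =>
    by_cases hV : pvIsV l = true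
    · have hH := isV_isH hV
      simp [pvALoop, hH, hV, pvCollect, pvALoop_true]
    · by_cases hH : pvIsH l = true
      · simp [pvALoop, hH, hV, ih]
      · simp [pvALoop, hH, hV, ih]

lemma pvFindFrom_le (p : String → Bool) (lines : List String) (i : Nat) :
    i ≤ pvFindFrom p lines i := by
  fun_induction pvFindFrom p lines i <;> omega

lemma drop_pvFindFrom (p : String → Bool) (lines : List String) (i : Nat) :
    lines.drop (pvFindFrom p lines i) = (lines.drop i).dropWhile (fun l => !p l) := by
  fun_induction pvFindFrom p lines i with
  | case1 i h hp =>
    conv_rhs => rw [List.drop_eq_getElem_cons h, List.dropWhile_cons]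
    simp [hp]
  | case2 i h hp ih =>
    conv_rhs => rw [List.drop_eq_getElem_cons h, List.dropWhile_cons]
    simp [hp, ih]
  | case3 i h =>
    rw [List.drop_eq_nil_of_le (by omega)]
    simp

lemma take_pvFindFrom (p : String → Bool) (lines : List String) (i : Nat) :
    (lines.drop i).take (pvFindFrom p lines i - i) = (lines.drop i).takeWhile (fun l => !p l) := by
  fun_induction pvFindFrom p lines i with
  | case1 i h hp =>
    rw [List.drop_eq_getElem_cons h, List.takeWhile_cons]
    simp [hp]
  | case2 i h hp ih =>
    have hle : i + 1 ≤ pvFindFrom p lines (i + 1) := pvFindFrom_le p lines (i + 1)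
    have hsub : pvFindFrom p lines (i + 1) - i = (pvFindFrom p lines (i + 1) - (i + 1)) + 1 := by
      omega
    rw [hsub, List.drop_eq_getElem_cons h, List.take_succ_cons, List.takeWhile_cons]
    simp [hp, ih]
  | case3 i h =>
    rw [List.drop_eq_nil_of_le (by omega)]
    simp

lemma main_eq (changelog : String) :
    extract_vnext_entries_py changelog = extract_vnext_entries_py_alt changelog := by
  simp only [extract_vnext_entries_py, extract_vnext_entries_py_alt]
  rw [pvALoop_false]
  rw [PySem.List.slice_natCast, take_pvFindFrom]
  have hd := drop_pvFindFrom pvIsV (PySem.Str.splitlines changelog) 0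
  simp only [List.drop_zero] at hd
  rw [hd]
  simp [pvCollect]

-- ===== VERDICT (by name: the statement is the Claim_ definition above) =====
theorem extract_vnext_entries_py_spec : Claim_equal_extract_vnext_entries_py := by
  intro changelog _
  unfold Spec_extract_vnext_entries_py
  exact main_eq changelog
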